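-- pv_equiv track=rewrite | github.com/artale-org/Artalor-Agent | backend/scripts/replicate_catalog.py | resolve_target_collections
-- ===== SOURCE A (Python) =====
-- from typing import Dict, List, Optional, Tuple
--
-- def resolve_target_collections(
--     collections: List[Dict],
-- ) -> Dict[str, List[str]]:
--     """Match available collections to our categories and return ALL matching slugs.
--
--     Uses whitelist (must contain) + blacklist (must not contain) for precise matching.
--
--     Returns:
--         Dict mapping category to list of matched collection slugs.
--     """
--     # Define whitelist keywords and blacklist keywords for each category
--     # A collection matches if: (any whitelist keyword matches) AND (no blacklist keyword matches)
--     category_rules: Dict[str, Dict[str, List[str]]] = {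
--         "image": {
--             "whitelist": ["text-to-image", "image-to-image", "image-generation", "image-editing"],
--             "blacklist": ["super-resolution", "upscale", "restore", "enhance", "ocr", "caption", "segmentation"],
--         },
--         "video": {
--             "whitelist": ["text-to-video", "image-to-video", "video-generation", "video-editing"],
--             "blacklist": ["video-to-text", "video-captioning", "video-understanding"],
--         },
--         "tts": {
--             "whitelist": ["text-to-speech", "tts", "voice-cloning", "voice-generation"],
--             "blacklist": ["speech-to-text", "transcription", "speech-recognition", "sing"],
--         },
--         "bgm": {
--             "whitelist": ["text-to-music", "music-generation", "text-to-audio"],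
--             "blacklist": ["speech", "voice", "transcription"],
--         },
--     }
--
--     result: Dict[str, List[str]] = {k: [] for k in category_rules}
--
--     for col in collections:
--         slug = col.get("slug", "")
--         name = col.get("name", "").lower()
--         if not slug:
--             continue
--
--         slug_lower = slug.lower()
--         combined = f"{slug_lower} {name}"  # Combine for matching
--
--         # Check which category this collection belongs to
--         for cat, rules in category_rules.items():
--             whitelist = rules["whitelist"]
--             blacklist = rules["blacklist"]
--
--             # Must match at least one whitelist keyword
--             if not any(kw in combined for kw in whitelist):
--                 continue
--
--             # Must not match any blacklist keyword
--             if any(kw in combined for kw in blacklist):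
--                 continue
--
--             if slug not in result[cat]:
--                 result[cat].append(slug)
--             break  # Each collection only goes to one category
--
--     return result
-- ===== SOURCE B (Python) =====
-- def resolve_target_collections(collections):
--     """Category-outer traversal: for each category in turn, scan the collections
--     and claim the ones it matches; a claimed-index set replicates first-category wins."""
--     RULES = [
--         ("image",
--          ["text-to-image", "image-to-image", "image-generation", "image-editing"],
--          ["super-resolution", "upscale", "restore", "enhance", "ocr", "caption", "segmentation"]),
--         ("video",
--          ["text-to-video", "image-to-video", "video-generation", "video-editing"],
--          ["video-to-text", "video-captioning", "video-understanding"]),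
--         ("tts",
--          ["text-to-speech", "tts", "voice-cloning", "voice-generation"],
--          ["speech-to-text", "transcription", "speech-recognition", "sing"]),
--         ("bgm",
--          ["text-to-music", "music-generation", "text-to-audio"],
--          ["speech", "voice", "transcription"]),
--     ]
--
--     entries = []
--     for col in collections:
--         slug = col.get("slug", "")
--         if not slug:
--             entries.append(None)
--         else:
--             entries.append((slug, slug.lower() + " " + col.get("name", "").lower()))
--
--     claimed = set()
--     out = {}
--     for cat, wl, bl in RULES:
--         slugs = []
--         for i, entry in enumerate(entries):
--             if entry is None or i in claimed:
--                 continue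
--             slug, combined = entry
--             if any(kw in combined for kw in wl) and not any(kw in combined for kw in bl):
--                 claimed.add(i)
--                 if slug not in slugs:
--                     slugs.append(slug)
--         out[cat] = slugs
--     return out
-- ===== Notes on version B (the rewrite author's own statement) =====
-- stated objective: alternative
-- what changed: Inverts the loop nesting: categories become the outer loop and collections the inner scan, with a claimed-index set carrying first-category-wins across passes, instead of A's per-collection inner rule loop with a break mutating the result dict.
import Mathlib
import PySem

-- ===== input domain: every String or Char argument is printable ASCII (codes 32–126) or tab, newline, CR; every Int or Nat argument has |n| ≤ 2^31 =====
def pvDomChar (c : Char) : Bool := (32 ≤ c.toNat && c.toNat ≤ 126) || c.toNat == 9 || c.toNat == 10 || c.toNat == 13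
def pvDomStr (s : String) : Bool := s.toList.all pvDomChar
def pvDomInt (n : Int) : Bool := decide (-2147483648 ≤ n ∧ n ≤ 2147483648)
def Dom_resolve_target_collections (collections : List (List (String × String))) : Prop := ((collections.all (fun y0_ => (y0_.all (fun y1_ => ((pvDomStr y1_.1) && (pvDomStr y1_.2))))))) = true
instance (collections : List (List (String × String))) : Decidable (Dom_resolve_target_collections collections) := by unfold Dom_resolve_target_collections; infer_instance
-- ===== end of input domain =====

-- B inverts A's loop nesting: categories become the outer loop, each category scans the
-- collections and claims the ones it matches via a claimed-index set (objective: alternative).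

-- ===== PORT A =====
-- the literal category_rules dict of dicts
def pvCategoryRules : PySem.Dict String (PySem.Dict String (List String)) :=
  PySem.Dict.ofList
    [("image", PySem.Dict.ofList
        [("whitelist", ["text-to-image", "image-to-image", "image-generation", "image-editing"]),
         ("blacklist", ["super-resolution", "upscale", "restore", "enhance", "ocr", "caption", "segmentation"])]),
     ("video", PySem.Dict.ofList
        [("whitelist", ["text-to-video", "image-to-video", "video-generation", "video-editing"]),
         ("blacklist", ["video-to-text", "video-captioning", "video-understanding"])]),
     ("tts", PySem.Dict.ofList
        [("whitelist", ["text-to-speech", "tts", "voice-cloning", "voice-generation"]),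
         ("blacklist", ["speech-to-text", "transcription", "speech-recognition", "sing"])]),
     ("bgm", PySem.Dict.ofList
        [("whitelist", ["text-to-music", "music-generation", "text-to-audio"]),
         ("blacklist", ["speech", "voice", "transcription"])])]

-- the inner 'for cat, rules in category_rules.items()' with its two continues and the break
def pvACatLoop (slug : String) (combined : List Char) :
    List (String × PySem.Dict String (List String)) →
    PySem.Dict String (List String) → PySem.Dict String (List String)
  | [], result => result
  | (cat, rules) :: rest, result =>
    let whitelist := rules.getD "whitelist" []
    let blacklist := rules.getD "blacklist" []
    if ¬ (whitelist.any (fun kw => PySem.Chars.isIn kw.toList combined)) then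
      pvACatLoop slug combined rest result
    else if blacklist.any (fun kw => PySem.Chars.isIn kw.toList combined) then
      pvACatLoop slug combined rest result
    else if (result.getD cat []).contains slug then result
    else result.modify cat [] (fun l => l ++ [slug])

-- the body of 'for col in collections'; combined = f"{slug_lower} {name}" built on List Char (exact)
def pvAStep (result : PySem.Dict String (List String)) (col : List (String × String)) :
    PySem.Dict String (List String) :=
  let colD := PySem.Dict.ofList col
  let slug := colD.getD "slug" ""
  let name := PySem.Chars.lower (colD.getD "name" "").toList
  if slug = "" then result
  else
    let combined := PySem.Chars.lower slug.toList ++ ' ' :: name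
    pvACatLoop slug combined pvCategoryRules.items result

def resolve_target_collections (collections : List (List (String × String))) :
    List (String × List String) :=
  let init := pvCategoryRules.keys.foldl
    (fun d k => d.insert k ([] : List String)) PySem.Dict.empty
  (collections.foldl pvAStep init).items

-- ===== PORT B =====
-- B's RULES table of (cat, whitelist, blacklist) triples
def pvRules : List (String × List String × List String) :=
  [("image",
    ["text-to-image", "image-to-image", "image-generation", "image-editing"],
    ["super-resolution", "upscale", "restore", "enhance", "ocr", "caption", "segmentation"]),
   ("video",
    ["text-to-video", "image-to-video", "video-generation", "video-editing"],
    ["video-to-text", "video-captioning", "video-understanding"]),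
   ("tts",
    ["text-to-speech", "tts", "voice-cloning", "voice-generation"],
    ["speech-to-text", "transcription", "speech-recognition", "sing"]),
   ("bgm",
    ["text-to-music", "music-generation", "text-to-audio"],
    ["speech", "voice", "transcription"])]

def pvMatchW (ws : List String) (c : List Char) : Bool :=
  ws.any (fun kw => PySem.Chars.isIn kw.toList c)

-- B's first pass: entries.append(None) or (slug, combined)
def pvEntry (col : List (String × String)) : Option (String × List Char) :=
  let d := PySem.Dict.ofList col
  let slug := d.getD "slug" ""
  if slug = "" then none
  else some (slug, PySem.Chars.lower slug.toList ++ ' ' :: PySem.Chars.lower (d.getD "name" "").toList)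

-- one step of B's inner 'for i, entry in enumerate(entries)' scan for one category
def pvPassStep (wl bl : List String) (st : PySem.Set Int × List String)
    (p : Int × Option (String × List Char)) : PySem.Set Int × List String :=
  match p.2 with
  | none => st
  | some (slug, comb) =>
    if PySem.Set.contains st.1 p.1 then st
    else if pvMatchW wl comb && !(pvMatchW bl comb) then
      (PySem.Set.add st.1 p.1, if st.2.contains slug then st.2 else st.2 ++ [slug])
    else st

def resolve_target_collections_alt (collections : List (List (String × String))) :
    List (String × List String) :=
  let indexed := PySem.List.enumerate (collections.map pvEntry)
  (pvRules.foldl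
    (fun st r =>
      let inner := indexed.foldl (pvPassStep r.2.1 r.2.2) (st.1, ([] : List String))
      (inner.1, st.2 ++ [(r.1, inner.2)]))
    ((PySem.Set.ofList []), ([] : List (String × List String)))).2

-- ===== PRECONDITION & SPEC =====
def Spec_resolve_target_collections (collections : List (List (String × String))) (out : List (String × List String)) : Prop := out = resolve_target_collections_alt collections
instance (collections : List (List (String × String))) (out : List (String × List String)) : Decidable (Spec_resolve_target_collections collections out) := by unfold Spec_resolve_target_collections; infer_instance

-- ===== CLAIM (what is proved, stated in full; the proofs are below) =====
def Claim_equal_resolve_target_collections : Prop := ∀ (collections : List (List (String × String))), Dom_resolve_target_collections collections → Spec_resolve_target_collections collections (resolve_target_collections collections)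

-- ===== LEMMAS AND PROOFS =====

-- proof-side: the first-matching category of an entry (A's break semantics)
def pvClassifyGo (combined : List Char) (slug : String) :
    List (String × List String × List String) → Option (String × String)
  | [] => none
  | (cat, wl, bl) :: rest =>
    if pvMatchW wl combined && !(pvMatchW bl combined) then some (cat, slug)
    else pvClassifyGo combined slug rest

def pvTag (ent : Option (String × List Char)) : Option (String × String) :=
  match ent with
  | none => none
  | some (s, c) => pvClassifyGo c s pvRules

-- proof-side: per-category accumulation of tagged entries
def pvAccum (cat : String) (tagged : List (Option (String × String)))
    (seen : List String) : List String :=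
  tagged.foldl (fun seen t =>
    match t with
    | some (c, s) => if c == cat && !(seen.contains s) then seen ++ [s] else seen
    | none => seen) seen

-- whether an entry was claimed by one of the already-processed rules
def pvClaimedBy (ent : Option (String × List Char))
    (done : List (String × List String × List String)) : Bool :=
  match ent with
  | none => false
  | some (_, c) => done.any (fun r => pvMatchW r.2.1 c && !(pvMatchW r.2.2 c))

def pvMk4 (l1 l2 l3 l4 : List String) : PySem.Dict String (List String) :=
  PySem.Dict.mk [("image", l1), ("video", l2), ("tts", l3), ("bgm", l4)]

-- ===== A-side: A's fold equals the four per-category accumulations of the tags =====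

lemma pvCatLoop_eq (rs : List (String × List String × List String)) (slug : String)
    (combined : List Char) (result : PySem.Dict String (List String)) :
    pvACatLoop slug combined
      (rs.map (fun r => (r.1, PySem.Dict.ofList [("whitelist", r.2.1), ("blacklist", r.2.2)]))) result
    = match pvClassifyGo combined slug rs with
      | none => result
      | some (c, s) =>
          if (result.getD c []).contains s then result
          else result.modify c [] (fun l => l ++ [s]) := by
  induction rs with
  | nil => rfl
  | cons hd tl ih =>
    obtain ⟨cat, wl, bl⟩ := hd
    show pvACatLoop slug combined (_ :: _) result = _
    rw [pvACatLoop, pvClassifyGo]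
    have hwl : (PySem.Dict.ofList [("whitelist", wl), ("blacklist", bl)]).getD "whitelist" [] = wl := rfl
    have hbl : (PySem.Dict.ofList [("whitelist", wl), ("blacklist", bl)]).getD "blacklist" [] = bl := rfl
    simp only [hwl, hbl]
    by_cases hw : (wl.any (fun kw => PySem.Chars.isIn kw.toList combined)) = true <;>
      by_cases hb : (bl.any (fun kw => PySem.Chars.isIn kw.toList combined)) = true <;>
        simp [pvMatchW, hw, hb, ih]

lemma pvItems_eq :
    pvCategoryRules.items
      = pvRules.map (fun r => (r.1, PySem.Dict.ofList [("whitelist", r.2.1), ("blacklist", r.2.2)])) := rfl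

-- A's per-collection step, expressed through the first-match tag
lemma pvAStep_eq (result : PySem.Dict String (List String)) (col : List (String × String)) :
    pvAStep result col
    = match pvTag (pvEntry col) with
      | none => result
      | some (c, s) =>
          if (result.getD c []).contains s then result
          else result.modify c [] (fun l => l ++ [s]) := by
  rw [pvAStep]
  by_cases h : (PySem.Dict.ofList col).getD "slug" "" = ""
  · simp [h, pvEntry, pvTag]
  · simp only [pvEntry, h, if_false, pvTag, pvItems_eq]
    exact pvCatLoop_eq pvRules _ _ result

-- a tag names one of the four categories
lemma pvTag_cases (ent : Option (String × List Char)) :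
    pvTag ent = none ∨
    ∃ s, pvTag ent = some ("image", s) ∨ pvTag ent = some ("video", s) ∨
         pvTag ent = some ("tts", s) ∨ pvTag ent = some ("bgm", s) := by
  cases ent with
  | none => simp [pvTag]
  | some sc =>
    obtain ⟨s, c⟩ := sc
    simp only [pvTag, pvRules, pvClassifyGo]
    split_ifs <;> simp

lemma pvAccum_none (cat : String) (ts : List (Option (String × String))) (l : List String) :
    pvAccum cat (none :: ts) l = pvAccum cat ts l := rfl

lemma pvAccum_some (cat c : String) (s : String) (ts : List (Option (String × String)))
    (l : List String) :
    pvAccum cat (some (c, s) :: ts) l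
      = pvAccum cat ts (if c == cat && !(l.contains s) then l ++ [s] else l) := rfl

lemma pvGetD1 (l1 l2 l3 l4 : List String) : (pvMk4 l1 l2 l3 l4).getD "image" [] = l1 := rfl
lemma pvGetD2 (l1 l2 l3 l4 : List String) : (pvMk4 l1 l2 l3 l4).getD "video" [] = l2 := rfl
lemma pvGetD3 (l1 l2 l3 l4 : List String) : (pvMk4 l1 l2 l3 l4).getD "tts" [] = l3 := rfl
lemma pvGetD4 (l1 l2 l3 l4 : List String) : (pvMk4 l1 l2 l3 l4).getD "bgm" [] = l4 := rfl

lemma pvMod1 (l1 l2 l3 l4 : List String) (f : List String → List String) :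
    (pvMk4 l1 l2 l3 l4).modify "image" [] f = pvMk4 (f l1) l2 l3 l4 := rfl
lemma pvMod2 (l1 l2 l3 l4 : List String) (f : List String → List String) :
    (pvMk4 l1 l2 l3 l4).modify "video" [] f = pvMk4 l1 (f l2) l3 l4 := rfl
lemma pvMod3 (l1 l2 l3 l4 : List String) (f : List String → List String) :
    (pvMk4 l1 l2 l3 l4).modify "tts" [] f = pvMk4 l1 l2 (f l3) l4 := rfl
lemma pvMod4 (l1 l2 l3 l4 : List String) (f : List String → List String) :
    (pvMk4 l1 l2 l3 l4).modify "bgm" [] f = pvMk4 l1 l2 l3 (f l4) := rfl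

-- the A-side invariant: folding A's step from any four seed lists
lemma pvMain (cs : List (List (String × String))) :
    ∀ l1 l2 l3 l4, cs.foldl pvAStep (pvMk4 l1 l2 l3 l4)
      = pvMk4 (pvAccum "image" (cs.map (fun col => pvTag (pvEntry col))) l1)
              (pvAccum "video" (cs.map (fun col => pvTag (pvEntry col))) l2)
              (pvAccum "tts" (cs.map (fun col => pvTag (pvEntry col))) l3)
              (pvAccum "bgm" (cs.map (fun col => pvTag (pvEntry col))) l4) := by
  induction cs with
  | nil => intro l1 l2 l3 l4; rfl
  | cons c cs ih =>
    intro l1 l2 l3 l4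
    rw [List.foldl_cons, List.map_cons, pvAStep_eq]
    rcases pvTag_cases (pvEntry c) with h | ⟨s, h | h | h | h⟩ <;>
      simp only [h, pvAccum_none, pvAccum_some,
        pvGetD1, pvGetD2, pvGetD3, pvGetD4] <;>
      simp [pvMod1, pvMod2, pvMod3, pvMod4, ih] <;>
      split_ifs <;> simp [ih]

-- ===== B-side: each category pass selects exactly the entries first-matched by that rule =====

-- the slug list one pass produces, expressed entrywise
def pvSel (r : String × List String × List String)
    (done : List (String × List String × List String))
    (ents : List (Option (String × List Char))) (acc : List String) : List String :=
  ents.foldl (fun acc ent =>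
    match ent with
    | none => acc
    | some (s, c) =>
      if !(pvClaimedBy (some (s, c)) done) && (pvMatchW r.2.1 c && !(pvMatchW r.2.2 c))
          && !(acc.contains s) then acc ++ [s] else acc) acc

lemma pvContains_add_ne {S : PySem.Set Int} {i j : Int} (h : j ≠ i) :
    PySem.Set.contains (PySem.Set.add S i) j = PySem.Set.contains S j := by
  by_cases hm : i ∈ S
  · rw [PySem.Set.add_of_mem hm]
  · rw [PySem.Set.add_of_not_mem hm]
    simp [h]

-- a pass never claims an index it does not visit
lemma pvPass_local (wl bl : List String) (L : List (Int × Option (String × List Char))) :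
    ∀ (S : PySem.Set Int) (acc : List String) (j : Int), j ∉ L.map Prod.fst →
      PySem.Set.contains (L.foldl (pvPassStep wl bl) (S, acc)).1 j
        = PySem.Set.contains S j := by
  induction L with
  | nil => intro S acc j _; rfl
  | cons p L ih =>
    intro S acc j hj
    simp only [List.map_cons, List.mem_cons, not_or] at hj
    rw [List.foldl_cons]
    obtain ⟨i, ent⟩ := p
    cases ent with
    | none => exact ih S acc j hj.2
    | some sc =>
      obtain ⟨s, c⟩ := sc
      by_cases h1 : PySem.Set.contains S i = true
      · have hstep : pvPassStep wl bl (S, acc) (i, some (s, c)) = (S, acc) := by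
          simp only [pvPassStep]; rw [if_pos h1]
        rw [hstep]; exact ih S acc j hj.2
      · by_cases h2 : (pvMatchW wl c && !(pvMatchW bl c)) = true
        · have hstep : pvPassStep wl bl (S, acc) (i, some (s, c))
              = (PySem.Set.add S i, if acc.contains s then acc else acc ++ [s]) := by
            simp only [pvPassStep]; rw [if_neg h1, if_pos h2]
          rw [hstep, ih _ _ j hj.2]; exact pvContains_add_ne hj.1
        · have hstep : pvPassStep wl bl (S, acc) (i, some (s, c)) = (S, acc) := by
            simp only [pvPassStep]; rw [if_neg h1, if_neg h2]
          rw [hstep]; exact ih S acc j hj.2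

lemma pvClaimedBy_append (ent : Option (String × List Char))
    (done : List (String × List String × List String)) (r : String × List String × List String) :
    pvClaimedBy ent (done ++ [r])
      = (pvClaimedBy ent done
          || match ent with
             | none => false
             | some (_, c) => pvMatchW r.2.1 c && !(pvMatchW r.2.2 c)) := by
  cases ent with
  | none => rfl
  | some sc => obtain ⟨s, c⟩ := sc; simp [pvClaimedBy]

-- one category pass: the slug list is pvSel, and the claimed set advances from done to done ++ [r]
lemma pvPass_eq (r : String × List String × List String)
    (done : List (String × List String × List String))
    (L : List (Int × Option (String × List Char))) :
    ∀ (S : PySem.Set Int) (acc : List String),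
      (L.map Prod.fst).Nodup →
      (∀ p ∈ L, PySem.Set.contains S p.1 = pvClaimedBy p.2 done) →
      (L.foldl (pvPassStep r.2.1 r.2.2) (S, acc)).2 = pvSel r done (L.map Prod.snd) acc ∧
      ∀ p ∈ L, PySem.Set.contains (L.foldl (pvPassStep r.2.1 r.2.2) (S, acc)).1 p.1
        = pvClaimedBy p.2 (done ++ [r]) := by
  induction L with
  | nil => intro S acc _ _; exact ⟨rfl, by simp⟩
  | cons p L ih =>
    intro S acc hnd hS
    simp only [List.map_cons, List.nodup_cons] at hnd
    obtain ⟨i, ent⟩ := p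
    have hSi : PySem.Set.contains S i = pvClaimedBy ent done := hS (i, ent) (List.mem_cons_self)
    have hStl : ∀ p ∈ L, PySem.Set.contains S p.1 = pvClaimedBy p.2 done :=
      fun q hq => hS q (List.mem_cons_of_mem _ hq)
    cases ent with
    | none =>
      have hstep : pvPassStep r.2.1 r.2.2 (S, acc) (i, none) = (S, acc) := rfl
      rw [List.foldl_cons, hstep]
      obtain ⟨h2, h1⟩ := ih S acc hnd.2 hStl
      refine ⟨h2, ?_⟩
      intro q hq
      rcases List.mem_cons.mp hq with hq | hq
      · subst hq
        show PySem.Set.contains (List.foldl (pvPassStep r.2.1 r.2.2) (S, acc) L).1 i = _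
        rw [pvPass_local _ _ L S acc i hnd.1, hSi, pvClaimedBy_append]
        rfl
      · exact h1 q hq
    | some sc =>
      obtain ⟨s, c⟩ := sc
      rw [List.foldl_cons]
      by_cases h1 : PySem.Set.contains S i = true
      · -- already claimed: skipped; pvSel skips because pvClaimedBy = true
        have hstep : pvPassStep r.2.1 r.2.2 (S, acc) (i, some (s, c)) = (S, acc) := by
          simp only [pvPassStep]; rw [if_pos h1]
        rw [hstep]
        obtain ⟨g2, g1⟩ := ih S acc hnd.2 hStl
        have hcl : pvClaimedBy (some (s, c)) done = true := by rw [← hSi]; exact h1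
        refine ⟨by rw [g2]; simp [pvSel, hcl], ?_⟩
        intro q hq
        rcases List.mem_cons.mp hq with hq | hq
        · subst hq
          show PySem.Set.contains (List.foldl (pvPassStep r.2.1 r.2.2) (S, acc) L).1 i = _
          rw [pvPass_local _ _ L S acc i hnd.1, h1, pvClaimedBy_append, hcl]; rfl
        · exact g1 q hq
      · have hcl : pvClaimedBy (some (s, c)) done = false := by rw [← hSi]; simpa using h1
        by_cases h2 : (pvMatchW r.2.1 c && !(pvMatchW r.2.2 c)) = true
        · -- match: claim i and (maybe) append the slug
          have hstep : pvPassStep r.2.1 r.2.2 (S, acc) (i, some (s, c))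
              = (PySem.Set.add S i, if acc.contains s then acc else acc ++ [s]) := by
            simp only [pvPassStep]; rw [if_neg h1, if_pos h2]
          rw [hstep]
          have hStl' : ∀ p ∈ L, PySem.Set.contains (PySem.Set.add S i) p.1 = pvClaimedBy p.2 done := by
            intro q hq
            have hne : q.1 ≠ i := by
              intro he
              exact hnd.1 (he ▸ (List.mem_map.mpr ⟨q, hq, rfl⟩))
            rw [pvContains_add_ne hne]; exact hStl q hq
          obtain ⟨g2, g1⟩ := ih (PySem.Set.add S i)
            (if acc.contains s then acc else acc ++ [s]) hnd.2 hStl'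
          constructor
          · rw [g2]
            simp only [pvSel, List.map_cons, List.foldl_cons, hcl, h2]
            by_cases h3 : acc.contains s = true <;> simp_all
          · intro q hq
            rcases List.mem_cons.mp hq with hq | hq
            · subst hq
              show PySem.Set.contains (List.foldl (pvPassStep r.2.1 r.2.2)
                (PySem.Set.add S i, if acc.contains s = true then acc else acc ++ [s]) L).1 i = _
              rw [pvPass_local _ _ L _ _ i hnd.1, pvClaimedBy_append, hcl]
              have hc : PySem.Set.contains (PySem.Set.add S i) i = true := by
                have hnm : i ∉ S := by
                  intro hm
                  exact h1 (by simp [PySem.Set.contains_eq_listContains]; exact hm)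
                rw [PySem.Set.add_of_not_mem hnm]
                simp
              rw [hc]; simp [h2]
            · exact g1 q hq
        · -- no match: skipped; pvSel skips because the match test fails
          have hstep : pvPassStep r.2.1 r.2.2 (S, acc) (i, some (s, c)) = (S, acc) := by
            simp only [pvPassStep]; rw [if_neg h1, if_neg h2]
          rw [hstep]
          rw [Bool.not_eq_true] at h2
          obtain ⟨g2, g1⟩ := ih S acc hnd.2 hStl
          refine ⟨by rw [g2]; simp only [pvSel, List.map_cons, List.foldl_cons, hcl, h2]; simp, ?_⟩
          intro q hq
          rcases List.mem_cons.mp hq with hq | hq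
          · subst hq
            show PySem.Set.contains (List.foldl (pvPassStep r.2.1 r.2.2) (S, acc) L).1 i = _
            rw [pvPass_local _ _ L S acc i hnd.1, pvClaimedBy_append, hcl]
            simp only [Bool.false_or, h2]
            simpa using h1
          · exact g1 q hq

-- classification helpers over a split rule list

lemma pvClassifyGo_append_of_not (c : List Char) (s : String)
    (done ts : List (String × List String × List String))
    (h : done.any (fun r => pvMatchW r.2.1 c && !(pvMatchW r.2.2 c)) = false) :
    pvClassifyGo c s (done ++ ts) = pvClassifyGo c s ts := by
  induction done with
  | nil => rfl
  | cons d ds ih =>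
    obtain ⟨dc, dwl, dbl⟩ := d
    simp only [List.any_cons, Bool.or_eq_false_iff] at h
    rw [List.cons_append, pvClassifyGo, if_neg (by simp [h.1]), ih h.2]

lemma pvClassifyGo_of_claimed (c : List Char) (s : String)
    (done : List (String × List String × List String))
    (h : done.any (fun r => pvMatchW r.2.1 c && !(pvMatchW r.2.2 c)) = true) :
    ∃ cat, cat ∈ done.map Prod.fst ∧
      ∀ ts, pvClassifyGo c s (done ++ ts) = some (cat, s) := by
  induction done with
  | nil => simp at h
  | cons d ds ih =>
    obtain ⟨dc, dwl, dbl⟩ := d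
    by_cases hm : (pvMatchW dwl c && !(pvMatchW dbl c)) = true
    · exact ⟨dc, by simp, fun ts => by rw [List.cons_append, pvClassifyGo, if_pos hm]⟩
    · simp only [List.any_cons, hm, Bool.false_or] at h
      obtain ⟨cat, hmem, hcl⟩ := ih h
      exact ⟨cat, by simp [List.mem_cons]; right; simpa using hmem,
        fun ts => by rw [List.cons_append, pvClassifyGo, if_neg hm]; exact hcl ts⟩

-- entrywise: selection by (done, r) equals selection by tag = r.1
lemma pvSel_eq_accum_step
    (r : String × List String × List String)
    (done rest : List (String × List String × List String))
    (hsplit : pvRules = done ++ r :: rest)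
    (hdone : ∀ r' ∈ done, r'.1 ≠ r.1)
    (hfresh : ∀ r' ∈ rest, r'.1 ≠ r.1)
    (ent : Option (String × List Char)) (acc : List String) :
    (match ent with
     | none => acc
     | some (s, c) =>
       if !(pvClaimedBy (some (s, c)) done) && (pvMatchW r.2.1 c && !(pvMatchW r.2.2 c))
           && !(acc.contains s) then acc ++ [s] else acc)
    = (match pvTag ent with
       | some (c, s) => if c == r.1 && !(acc.contains s) then acc ++ [s] else acc
       | none => acc) := by
  cases ent with
  | none => rfl
  | some sc =>
    obtain ⟨s, c⟩ := sc
    obtain ⟨rc, rwl, rbl⟩ := r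
    have htag : pvTag (some (s, c)) = pvClassifyGo c s pvRules := rfl
    rw [htag, hsplit]
    by_cases hd : pvClaimedBy (some (s, c)) done = true
    · obtain ⟨cat, hmem, hcl⟩ := pvClassifyGo_of_claimed c s done hd
      rw [hcl ((rc, rwl, rbl) :: rest)]
      have hne : (cat == rc) = false := by
        obtain ⟨r', hr', he⟩ := List.mem_map.mp hmem
        exact beq_eq_false_iff_ne.mpr (he ▸ hdone r' hr')
      simp [hd, hne]
    · have hd' : pvClaimedBy (some (s, c)) done = false := by simpa using hd
      rw [pvClassifyGo_append_of_not c s done _ hd', pvClassifyGo]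
      by_cases hm : (pvMatchW rwl c && !(pvMatchW rbl c)) = true
      · rw [if_pos hm]
        simp [hd', hm]
      · rw [Bool.not_eq_true] at hm
        rw [if_neg (by simp [hm])]
        cases hres : pvClassifyGo c s rest with
        | none => simp [hm, hd']
        | some p =>
          obtain ⟨cat, s'⟩ := p
          have hmem : cat ∈ rest.map Prod.fst := by
            clear hsplit hfresh
            induction rest with
            | nil => simp [pvClassifyGo] at hres
            | cons d ds ih =>
              obtain ⟨dc, dwl, dbl⟩ := d
              rw [pvClassifyGo] at hres
              by_cases hx : (pvMatchW dwl c && !(pvMatchW dbl c)) = true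
              · rw [if_pos hx] at hres
                simp at hres
                simp [hres.1]
              · rw [if_neg hx] at hres
                simp [List.mem_cons]
                right; simpa using ih hres
          have hne : (cat == rc) = false := by
            obtain ⟨r', hr', he⟩ := List.mem_map.mp hmem
            exact beq_eq_false_iff_ne.mpr (he ▸ hfresh r' hr')
          simp [hm, hne, hd']

-- folding the step over the entries: pvSel is pvAccum of the tags
lemma pvSel_eq_accum
    (r : String × List String × List String)
    (done rest : List (String × List String × List String))
    (hsplit : pvRules = done ++ r :: rest)
    (hdone : ∀ r' ∈ done, r'.1 ≠ r.1)
    (hfresh : ∀ r' ∈ rest, r'.1 ≠ r.1)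
    (ents : List (Option (String × List Char))) :
    ∀ acc, pvSel r done ents acc = pvAccum r.1 (ents.map pvTag) acc := by
  induction ents with
  | nil => intro acc; rfl
  | cons e es ih =>
    intro acc
    show List.foldl _ _ (e :: es) = pvAccum r.1 ((e :: es).map pvTag) acc
    rw [List.map_cons, List.foldl_cons, pvAccum, List.foldl_cons]
    rw [pvSel_eq_accum_step r done rest hsplit hdone hfresh e acc]
    exact ih _

-- the four pass results of B, with their done-prefixes
def pvSels (ents : List (Option (String × List Char))) :
    List (String × List String × List String) →
    List (String × List String × List String) → List (String × List String)
  | [], _ => []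
  | r :: rs, done => (r.1, pvSel r done ents []) :: pvSels ents rs (done ++ [r])

lemma pvClaimedBy_nil (ent : Option (String × List Char)) : pvClaimedBy ent [] = false := by
  cases ent <;> rfl

-- the outer category loop of B, chained through pvPass_eq
lemma pvOuter (L : List (Int × Option (String × List Char)))
    (hnd : (L.map Prod.fst).Nodup)
    (rs : List (String × List String × List String)) :
    ∀ (done : List (String × List String × List String)) (S : PySem.Set Int)
      (out : List (String × List String)),
      (∀ p ∈ L, PySem.Set.contains S p.1 = pvClaimedBy p.2 done) →
      (rs.foldl
        (fun st r =>
          let inner := L.foldl (pvPassStep r.2.1 r.2.2) (st.1, ([] : List String))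
          (inner.1, st.2 ++ [(r.1, inner.2)])) (S, out)).2
        = out ++ pvSels (L.map Prod.snd) rs done := by
  induction rs with
  | nil => intro done S out _; simp [pvSels]
  | cons r rs ih =>
    intro done S out hS
    obtain ⟨h2, h1⟩ := pvPass_eq r done L S [] hnd hS
    rw [List.foldl_cons]
    show (rs.foldl _ ((L.foldl (pvPassStep r.2.1 r.2.2) (S, [])).1,
      out ++ [(r.1, (L.foldl (pvPassStep r.2.1 r.2.2) (S, [])).2)])).2 = _
    rw [h2, ih (done ++ [r]) _ _ h1, pvSels]
    simp

-- ===== VERDICT (by name: the statement is the Claim_ definition above) =====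
theorem resolve_target_collections_spec : Claim_equal_resolve_target_collections := by
  intro cs _
  show (List.foldl pvAStep (pvMk4 [] [] [] []) cs).items = resolve_target_collections_alt cs
  rw [pvMain cs]
  have hnd : ((PySem.List.enumerate (cs.map pvEntry)).map Prod.fst).Nodup := by
    rw [PySem.List.map_fst_enumerate]
    exact PySem.List.nodup_pyRange_one 0 _
  have hL : resolve_target_collections_alt cs
      = pvSels ((PySem.List.enumerate (cs.map pvEntry)).map Prod.snd) pvRules [] := by
    show (pvRules.foldl
        (fun st r =>
          let inner := (PySem.List.enumerate (cs.map pvEntry)).foldl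
            (pvPassStep r.2.1 r.2.2) (st.1, ([] : List String))
          (inner.1, st.2 ++ [(r.1, inner.2)]))
        ((PySem.Set.ofList []), ([] : List (String × List String)))).2 = _
    refine pvOuter _ hnd pvRules [] _ [] ?_
    intro p _; rw [pvClaimedBy_nil]; rfl
  rw [hL, PySem.List.map_snd_enumerate]
  show [("image", _), ("video", _), ("tts", _), ("bgm", _)] = _
  simp only [pvRules, pvSels]
  rw [pvSel_eq_accum _ _ _ (by rfl) (by decide) (by decide),
      pvSel_eq_accum _ _ _ (by rfl) (by decide) (by decide),
      pvSel_eq_accum _ _ _ (by rfl) (by decide) (by decide),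
      pvSel_eq_accum _ _ _ (by rfl) (by decide) (by decide)]
  simp [List.map_map]
  exact ⟨rfl, rfl, rfl, rfl⟩
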